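-- pv_equiv track=rewrite | github.com/enya126/Python-2---software-design | cs313e/InterestingDrink.py | find_purchase_options
-- ===== SOURCE A (Python) =====
-- def find_purchase_options(prices, money):
--     count = 0
--     shops_lst = []
--     for i in range(0, len(money)):
--         for j in range(0, len(prices)):
--             if money[i] >= prices[j]:
--                 count += 1
--         shops_lst.append(count)
--         count = 0
--     return shops_lst
-- ===== SOURCE B (Python) =====
-- def _bisect_right(a, x):
--     # standard bisect_right binary search on a sorted list
--     lo, hi = 0, len(a)
--     while lo < hi:
--         mid = (lo + hi) // 2
--         if x < a[mid]:
--             hi = mid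
--         else:
--             lo = mid + 1
--     return lo
--
--
-- def find_purchase_options(prices, money):
--     sorted_prices = sorted(prices)
--     shops_lst = []
--     for m in money:
--         shops_lst.append(_bisect_right(sorted_prices, m))
--     return shops_lst
-- ===== Notes on version B (the rewrite author's own statement) =====
-- stated objective: faster
-- what changed: Replaces the nested scan of all prices for every money value by sorting the prices once and answering each money value with a bisect_right binary search.
import Mathlib
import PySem

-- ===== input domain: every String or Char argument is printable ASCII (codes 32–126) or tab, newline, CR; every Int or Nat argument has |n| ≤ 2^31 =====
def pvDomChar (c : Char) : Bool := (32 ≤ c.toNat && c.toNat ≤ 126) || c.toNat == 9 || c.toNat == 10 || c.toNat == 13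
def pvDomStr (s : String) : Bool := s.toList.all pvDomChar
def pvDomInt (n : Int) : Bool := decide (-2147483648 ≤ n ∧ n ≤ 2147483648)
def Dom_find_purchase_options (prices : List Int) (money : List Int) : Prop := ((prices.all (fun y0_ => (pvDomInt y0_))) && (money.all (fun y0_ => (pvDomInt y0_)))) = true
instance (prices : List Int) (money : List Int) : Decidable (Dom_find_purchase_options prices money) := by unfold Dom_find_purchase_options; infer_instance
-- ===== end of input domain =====

-- B sorts the prices once and answers every money value with a bisect_right
-- binary search instead of A's rescan of all prices per money value (faster).

-- ===== PORT A =====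
-- A: for each money value, scan all prices counting those ≤ it, append the count.
def find_purchase_options (prices : List Int) (money : List Int) : List Int :=
  money.foldl
    (fun shops_lst m =>
      shops_lst ++ [prices.foldl (fun count p => if m ≥ p then count + 1 else count) 0])
    []

-- ===== PORT B =====
-- B: sort the prices once; each count is a bisect_right binary search
-- (Source B's hand-written _bisect_right is exactly PySem.List.bisectRight's loop).
def find_purchase_options_alt (prices : List Int) (money : List Int) : List Int :=
  let sorted_prices := PySem.List.sorted prices (fun x => x)
  money.foldl
    (fun shops_lst m => shops_lst ++ [(PySem.List.bisectRight sorted_prices m : Int)])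
    []

-- ===== PRECONDITION & SPEC =====
def Spec_find_purchase_options (prices : List Int) (money : List Int) (out : List Int) : Prop := out = find_purchase_options_alt prices money
instance (prices : List Int) (money : List Int) (out : List Int) : Decidable (Spec_find_purchase_options prices money out) := by unfold Spec_find_purchase_options; infer_instance

-- ===== CLAIM (what is proved, stated in full; the proofs are below) =====
def Claim_equal_find_purchase_options : Prop := ∀ (prices : List Int) (money : List Int), Dom_find_purchase_options prices money → Spec_find_purchase_options prices money (find_purchase_options prices money)

-- ===== LEMMAS AND PROOFS =====

-- On a sorted list, bisect_right's result is the number of elements ≤ m.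
theorem bisectRight_eq_countP (sp : List Int) (m : Int)
    (hs : List.Pairwise (fun a b => a ≤ b) sp) :
    PySem.List.bisectRight sp m = sp.countP (fun p => decide (p ≤ m)) := by
  obtain ⟨hle, hlt, hgt⟩ := PySem.List.bisectRight_spec sp m hs
  set r := PySem.List.bisectRight sp m with hr
  have htd : sp = sp.take r ++ sp.drop r := (List.take_append_drop r sp).symm
  rw [htd, List.countP_append]
  have h1 : (sp.take r).countP (fun p => decide (p ≤ m)) = r := by
    have : (sp.take r).countP (fun p => decide (p ≤ m)) = (sp.take r).length := by
      apply List.countP_eq_length.mpr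
      intro a ha
      obtain ⟨i, hi, rfl⟩ := List.getElem_of_mem ha
      have hilen : i < sp.length := lt_of_lt_of_le hi (by simp)
      have := hlt i hilen (by simpa [hilen] using hi)
      simp [List.getElem_take] at this ⊢
      omega
    rw [this, List.length_take]
    omega
  have h2 : (sp.drop r).countP (fun p => decide (p ≤ m)) = 0 := by
    apply List.countP_eq_zero.mpr
    intro a ha
    obtain ⟨i, hi, rfl⟩ := List.getElem_of_mem ha
    have hilen : r + i < sp.length := by
      have := List.length_drop (l := sp) (i := r); omega
    have := hgt (r + i) hilen (by omega)
    simp [List.getElem_drop] at this ⊢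
    omega
  omega

-- A's inner scan of prices equals B's bisect on the sorted prices.
theorem inner_count_eq (prices : List Int) (m : Int) :
    prices.foldl (fun count p => if m ≥ p then count + 1 else count) 0
      = (PySem.List.bisectRight (PySem.List.sorted prices (fun x => x)) m : Int) := by
  have h1 : prices.foldl (fun count p => if m ≥ p then count + 1 else count) 0
      = ((0 : Int) + (prices.countP (fun p => decide (p ≤ m)) : Int)) := by
    simpa using PySem.List.foldl_count_if (fun p => decide (p ≤ m)) prices 0
  rw [h1, bisectRight_eq_countP _ m (PySem.List.sorted_pairwise prices (fun x => x))]
  rw [List.Perm.countP_eq (l₁ := PySem.List.sorted prices (fun x => x))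
    (PySem.List.sorted_perm prices (fun x => x) false) (p := fun p => decide (p ≤ m))]
  omega

-- ===== VERDICT (by name: the statement is the Claim_ definition above) =====
theorem find_purchase_options_spec : Claim_equal_find_purchase_options := by
  intro prices money _
  unfold Spec_find_purchase_options find_purchase_options find_purchase_options_alt
  rw [PySem.List.foldl_append_singleton_eq_map, PySem.List.foldl_append_singleton_eq_map]
  simp only [List.nil_append]
  exact List.map_congr_left (fun m _ => inner_count_eq prices m)
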